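-- pv_equiv track=rewrite | github.com/efvaldez1/sustainable_construction_indicator_v3 | conceptnote_v6.py | get_dimension_coverage
-- ===== SOURCE A (Python) =====
-- from typing import List, Dict, Tuple, Any
--
-- def get_dimension_coverage(detected_indicators: Dict[str, List]) -> Dict[str, int]:
--     environmental_indicators = [
--         "Building Energy Efficiency", "Energy Consumption", "Thermal Performance",
--         "Fuel Type for Equipment", "Lifecycle Carbon Reporting", "Low Emission Construction Materials",
--         "Renewable Energy Systems", "Renewable Energy Use",
--         "Scope 1 GHG Emissions - Onsite Emissions Reduction Measures",
--         "Scope 2 GHG Emissions - Procurement of Renewable or Clean Electricity",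
--         "Waste Management in Construction", "Ecological Impacts", "Land Use Change",
--         "Sustainable Maintenance Planning", "Air Quality (PM)", "Biological Oxygen Demand (BOD)",
--         "Chemical Oxygen Demand (COD)", "Light Pollution", "Noise Pollution", "Soil Contamination",
--         "Suspended Solids", "pH Level", "Stormwater Management", "Water Harvesting and Efficiency",
--         "Indoor Environmental Quality"
--     ]
--     social_indicators = [
--         "Stakeholder Transparency", "Training and Capacity Building", "Community Co-Design",
--         "Community Engagement", "Local Employment", "Gender Inclusion", "Gender Responsive Design",
--         "Inclusive Design & Accessibility", "Worker Health & Safety",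
--         "Health & Well-being (Indoor Air, Lighting, Acoustic)"
--     ]
--     economic_indicators = [
--         "Cost of Ecosystem Rehabilitation", "Cost of Relocation",
--         "Building Information Modelling (BIM) Use",
--         "Local Content and Sourcing", "Local Economic Benefits",
--         "Circular Construction Practices",
--         "Structure Durability",
--         "Lifecycle Cost Analysis"
--     ]
--
--     environmental_count = 0
--     social_count = 0
--     economic_count = 0
--
--     detected_indicator_names = set(detected_indicators.keys())
--
--     for ind_name in detected_indicator_names:
--         if ind_name in environmental_indicators:
--             environmental_count +=1
--         elif ind_name in social_indicators:
--             social_count +=1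
--         elif ind_name in economic_indicators:
--             economic_count +=1
--
--     return {
--         "Environmental": environmental_count,
--         "Social": social_count,
--         "Economic": economic_count
--     }
-- ===== SOURCE B (Python) =====
-- def _count_present(category, detected):
--     # how many indicators of this category appear among the detected ones
--     return sum(1 for name in category if name in detected)
--
--
-- def get_dimension_coverage(detected_indicators):
--     environmental_indicators = [
--         "Building Energy Efficiency", "Energy Consumption", "Thermal Performance",
--         "Fuel Type for Equipment", "Lifecycle Carbon Reporting", "Low Emission Construction Materials",
--         "Renewable Energy Systems", "Renewable Energy Use",
--         "Scope 1 GHG Emissions - Onsite Emissions Reduction Measures",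
--         "Scope 2 GHG Emissions - Procurement of Renewable or Clean Electricity",
--         "Waste Management in Construction", "Ecological Impacts", "Land Use Change",
--         "Sustainable Maintenance Planning", "Air Quality (PM)", "Biological Oxygen Demand (BOD)",
--         "Chemical Oxygen Demand (COD)", "Light Pollution", "Noise Pollution", "Soil Contamination",
--         "Suspended Solids", "pH Level", "Stormwater Management", "Water Harvesting and Efficiency",
--         "Indoor Environmental Quality"
--     ]
--     social_indicators = [
--         "Stakeholder Transparency", "Training and Capacity Building", "Community Co-Design",
--         "Community Engagement", "Local Employment", "Gender Inclusion", "Gender Responsive Design",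
--         "Inclusive Design & Accessibility", "Worker Health & Safety",
--         "Health & Well-being (Indoor Air, Lighting, Acoustic)"
--     ]
--     economic_indicators = [
--         "Cost of Ecosystem Rehabilitation", "Cost of Relocation",
--         "Building Information Modelling (BIM) Use",
--         "Local Content and Sourcing", "Local Economic Benefits",
--         "Circular Construction Practices",
--         "Structure Durability",
--         "Lifecycle Cost Analysis"
--     ]
--
--     # Traversal is inverted w.r.t. scanning the detected keys: walk each constant
--     # category list once and test membership in the detected dict. Dict keys are
--     # unique and the three category lists are disjoint and duplicate-free, so the
--     # counts are identical to classifying each detected key.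
--     return {
--         "Environmental": _count_present(environmental_indicators, detected_indicators),
--         "Social": _count_present(social_indicators, detected_indicators),
--         "Economic": _count_present(economic_indicators, detected_indicators),
--     }
-- ===== Notes on version B (the rewrite author's own statement) =====
-- stated objective: simpler
-- what changed: Inverts the traversal: instead of classifying each detected key through an elif-cascade of three list membership scans, B walks each constant category list once and counts its members present in the detected dict (exact because dict keys are unique and the category lists are disjoint and duplicate-free).
import Mathlib
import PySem

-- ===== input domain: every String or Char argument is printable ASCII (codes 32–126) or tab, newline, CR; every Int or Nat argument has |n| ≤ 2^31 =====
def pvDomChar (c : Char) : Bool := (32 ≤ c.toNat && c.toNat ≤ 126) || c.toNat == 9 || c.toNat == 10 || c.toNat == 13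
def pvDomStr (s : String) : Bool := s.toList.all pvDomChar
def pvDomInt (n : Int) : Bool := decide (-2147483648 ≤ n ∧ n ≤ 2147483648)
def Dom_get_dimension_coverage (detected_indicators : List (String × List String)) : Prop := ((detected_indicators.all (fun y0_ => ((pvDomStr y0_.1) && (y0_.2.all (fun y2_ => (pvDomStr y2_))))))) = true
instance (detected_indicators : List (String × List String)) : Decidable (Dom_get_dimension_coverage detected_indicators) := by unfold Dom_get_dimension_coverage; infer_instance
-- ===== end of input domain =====

-- B inverts the traversal: instead of classifying each detected key by an elif-cascade of
-- list scans, it counts per constant category list the members present among the detected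
-- keys (objective: simpler; exact since dict keys are unique and the category lists are
-- disjoint and duplicate-free).


-- ===== PORT A =====
def pvEnvironmentalIndicators : List String := [
    "Building Energy Efficiency", "Energy Consumption", "Thermal Performance",
    "Fuel Type for Equipment", "Lifecycle Carbon Reporting", "Low Emission Construction Materials",
    "Renewable Energy Systems", "Renewable Energy Use",
    "Scope 1 GHG Emissions - Onsite Emissions Reduction Measures",
    "Scope 2 GHG Emissions - Procurement of Renewable or Clean Electricity",
    "Waste Management in Construction", "Ecological Impacts", "Land Use Change",
    "Sustainable Maintenance Planning", "Air Quality (PM)", "Biological Oxygen Demand (BOD)",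
    "Chemical Oxygen Demand (COD)", "Light Pollution", "Noise Pollution", "Soil Contamination",
    "Suspended Solids", "pH Level", "Stormwater Management", "Water Harvesting and Efficiency",
    "Indoor Environmental Quality"]

def pvSocialIndicators : List String := [
    "Stakeholder Transparency", "Training and Capacity Building", "Community Co-Design",
    "Community Engagement", "Local Employment", "Gender Inclusion", "Gender Responsive Design",
    "Inclusive Design & Accessibility", "Worker Health & Safety",
    "Health & Well-being (Indoor Air, Lighting, Acoustic)"]

def pvEconomicIndicators : List String := [
    "Cost of Ecosystem Rehabilitation", "Cost of Relocation",
    "Building Information Modelling (BIM) Use",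
    "Local Content and Sourcing", "Local Economic Benefits",
    "Circular Construction Practices",
    "Structure Durability",
    "Lifecycle Cost Analysis"]

def get_dimension_coverage (detected_indicators : List (String × List String)) : List (String × Int) :=
  let detected_indicator_names : PySem.Set String :=
    PySem.Set.ofList (detected_indicators.map (fun p => p.1))
  let counts := detected_indicator_names.foldl
    (fun (acc : Int × Int × Int) ind_name =>
      if pvEnvironmentalIndicators.contains ind_name then (acc.1 + 1, acc.2.1, acc.2.2)
      else if pvSocialIndicators.contains ind_name then (acc.1, acc.2.1 + 1, acc.2.2)
      else if pvEconomicIndicators.contains ind_name then (acc.1, acc.2.1, acc.2.2 + 1)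
      else acc)
    ((0 : Int), (0 : Int), (0 : Int))
  [("Environmental", counts.1), ("Social", counts.2.1), ("Economic", counts.2.2)]

-- ===== PORT B =====
-- sum(1 for name in category if name in detected) : walk the category list, test key membership
def pvCountPresent (category : List String) (detected : List (String × List String)) : Int :=
  (category.countP (fun name => (detected.map (fun p => p.1)).contains name) : Nat)

def get_dimension_coverage_alt (detected_indicators : List (String × List String)) : List (String × Int) :=
  [("Environmental", pvCountPresent pvEnvironmentalIndicators detected_indicators),
   ("Social", pvCountPresent pvSocialIndicators detected_indicators),
   ("Economic", pvCountPresent pvEconomicIndicators detected_indicators)]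

-- ===== PRECONDITION & SPEC =====
def Spec_get_dimension_coverage (detected_indicators : List (String × List String)) (out : List (String × Int)) : Prop := out = get_dimension_coverage_alt detected_indicators
instance (detected_indicators : List (String × List String)) (out : List (String × Int)) : Decidable (Spec_get_dimension_coverage detected_indicators out) := by unfold Spec_get_dimension_coverage; infer_instance

-- ===== CLAIM =====
def Claim_equal_get_dimension_coverage : Prop := ∀ (detected_indicators : List (String × List String)), Dom_get_dimension_coverage detected_indicators → Spec_get_dimension_coverage detected_indicators (get_dimension_coverage detected_indicators)

-- ===== LEMMAS AND PROOFS =====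

-- A's fold computes the three elif-cascade counts over the deduplicated key list
theorem pv_foldA (names : List String) : ∀ (e s c : Int),
    (names.foldl
      (fun (acc : Int × Int × Int) ind_name =>
        if pvEnvironmentalIndicators.contains ind_name then (acc.1 + 1, acc.2.1, acc.2.2)
        else if pvSocialIndicators.contains ind_name then (acc.1, acc.2.1 + 1, acc.2.2)
        else if pvEconomicIndicators.contains ind_name then (acc.1, acc.2.1, acc.2.2 + 1)
        else acc)
      (e, s, c)) =
    (e + (names.countP (fun n => pvEnvironmentalIndicators.contains n) : Nat),
     s + (names.countP (fun n => !pvEnvironmentalIndicators.contains n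
            && pvSocialIndicators.contains n) : Nat),
     c + (names.countP (fun n => !pvEnvironmentalIndicators.contains n
            && !pvSocialIndicators.contains n && pvEconomicIndicators.contains n) : Nat)) := by
  induction names with
  | nil => intro e s c; simp
  | cons a t ih =>
    intro e s c
    simp only [List.foldl_cons, List.countP_cons]
    by_cases h1 : pvEnvironmentalIndicators.contains a
    · rw [if_pos h1, ih (e + 1) s c]
      simp only [h1, Bool.not_true, Bool.false_and, Prod.mk.injEq]
      refine ⟨?_, ?_, ?_⟩ <;> simp <;> omega
    · by_cases h2 : pvSocialIndicators.contains a
      · rw [if_neg h1, if_pos h2, ih e (s + 1) c]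
        simp only [h1, h2, Bool.not_false, Bool.true_and, Prod.mk.injEq]
        refine ⟨?_, ?_, ?_⟩ <;> simp <;> omega
      · by_cases h3 : pvEconomicIndicators.contains a
        · rw [if_neg h1, if_neg h2, if_pos h3, ih e s (c + 1)]
          simp only [h1, h2, h3, Prod.mk.injEq]
          refine ⟨?_, ?_, ?_⟩ <;> simp <;> omega
        · rw [if_neg h1, if_neg h2, if_neg h3, ih e s c]
          simp only [h1, h2, h3, Bool.and_false, Prod.mk.injEq]
          refine ⟨?_, ?_, ?_⟩ <;> simp

-- the category lists are pairwise disjoint, so the elif guards collapse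
theorem pv_soc_disj : pvSocialIndicators.all
    (fun n => !pvEnvironmentalIndicators.contains n) = true := by decide

theorem pv_eco_disj : pvEconomicIndicators.all
    (fun n => !pvEnvironmentalIndicators.contains n
      && !pvSocialIndicators.contains n) = true := by decide

theorem pv_guard_soc :
    (fun n => !pvEnvironmentalIndicators.contains n && pvSocialIndicators.contains n) =
    (fun n => pvSocialIndicators.contains n) := by
  funext n
  by_cases h : pvSocialIndicators.contains n
  · have hm : n ∈ pvSocialIndicators := by simpa using h
    have := List.all_eq_true.mp pv_soc_disj n hm
    simp only [h, this, Bool.true_and]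
  · have hs : pvSocialIndicators.contains n = false := by simpa using h
    rw [hs, Bool.and_false]

theorem pv_guard_eco :
    (fun n => !pvEnvironmentalIndicators.contains n && !pvSocialIndicators.contains n
        && pvEconomicIndicators.contains n) =
    (fun n => pvEconomicIndicators.contains n) := by
  funext n
  by_cases h : pvEconomicIndicators.contains n
  · have hm : n ∈ pvEconomicIndicators := by simpa using h
    have := List.all_eq_true.mp pv_eco_disj n hm
    simp only [h, this, Bool.true_and]
  · have he : pvEconomicIndicators.contains n = false := by simpa using h
    rw [he, Bool.and_false]

-- helper for the swap: splitting off one element of the membership predicate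
theorem pv_countP_or {α : Type} [DecidableEq α] (l : List α) (a : α) (q : α → Bool)
    (hq : q a = false) :
    l.countP (fun n => n == a || q n) = l.count a + l.countP q := by
  induction l with
  | nil => simp
  | cons x t ih =>
    rw [List.countP_cons, List.countP_cons, List.count_cons, ih]
    by_cases hx : x = a
    · subst hx
      simp [hq]
      omega
    · simp [hx]
      omega

-- counting members of l1 present in l2 is symmetric for duplicate-free lists
theorem pv_countP_swap {α : Type} [DecidableEq α] (l1 l2 : List α)
    (h1 : l1.Nodup) (h2 : l2.Nodup) :
    l1.countP (fun n => l2.contains n) = l2.countP (fun n => l1.contains n) := by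
  induction l1 with
  | nil => simp
  | cons a t ih =>
    have ha : a ∉ t := (List.nodup_cons.mp h1).1
    have ht : t.Nodup := (List.nodup_cons.mp h1).2
    simp only [List.countP_cons]
    have hpred : (fun n => (a :: t).contains n) = (fun n => n == a || t.contains n) := by
      funext n; simp only [List.contains_cons]
    rw [hpred, pv_countP_or l2 a (fun n => t.contains n)
        (by simp [List.contains_eq_mem, ha]), ← ih ht]
    have hcount : l2.count a = if l2.contains a then 1 else 0 := by
      by_cases h : a ∈ l2
      · simp [List.contains_eq_mem, h, List.count_eq_one_of_mem h2 h]
      · simp [List.contains_eq_mem, h, List.count_eq_zero.mpr h]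
    rw [hcount]
    split_ifs <;> omega

-- the three category lists are duplicate-free
theorem pv_env_nodup : pvEnvironmentalIndicators.Nodup := by decide
theorem pv_soc_nodup : pvSocialIndicators.Nodup := by decide
theorem pv_eco_nodup : pvEconomicIndicators.Nodup := by decide

-- membership in the deduplicated key list is membership in the key list
theorem pv_contains_ofList (keys : List String) :
    (fun n => List.contains (PySem.Set.ofList keys) n) = (fun n => keys.contains n) := by
  funext n
  simp [List.contains_eq_mem, PySem.Set.mem_ofList]

-- the per-category count over deduplicated keys equals B's count over the category list
theorem pv_cat_count (cat : List String) (hcat : cat.Nodup) (keys : List String) :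
    (((PySem.Set.ofList keys).countP (fun n => cat.contains n) : Nat) : Int) =
      (cat.countP (fun n => keys.contains n) : Nat) := by
  rw [pv_countP_swap (PySem.Set.ofList keys) cat (PySem.Set.nodup_ofList keys) hcat,
    pv_contains_ofList]

-- ===== VERDICT =====
theorem get_dimension_coverage_spec : Claim_equal_get_dimension_coverage := by
  intro d _
  unfold Spec_get_dimension_coverage get_dimension_coverage get_dimension_coverage_alt pvCountPresent
  simp only [pv_foldA, pv_guard_soc, pv_guard_eco, zero_add]
  rw [pv_cat_count pvEnvironmentalIndicators pv_env_nodup,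
      pv_cat_count pvSocialIndicators pv_soc_nodup,
      pv_cat_count pvEconomicIndicators pv_eco_nodup]
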